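-- pv_equiv track=rewrite | github.com/ryosuke0825/atcoder_python | other/code_festival_final_c.py | f
-- ===== SOURCE A (Python) =====
-- def f(n):
--     tmp = n
--     ans = 0
--     base = 1
--     # 桁数だけループする
--     while tmp:
--         ans += tmp % 10*base
--         base *= n
--         tmp //= 10
--     return ans
-- ===== SOURCE B (Python) =====
-- def f(n):
--     # Horner's method over the decimal string of n, most-significant digit first.
--     ans = 0
--     for ch in str(n):
--         ans = ans * n + int(ch)
--     return ans
-- ===== Notes on version B (the rewrite author's own statement) =====
-- stated objective: simpler
-- what changed: Replaces the LSB-first modulo/floor-division digit loop with an explicit power accumulator by Horner's method over str(n) traversed MSB-first with a single running accumulator.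
import Mathlib
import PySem

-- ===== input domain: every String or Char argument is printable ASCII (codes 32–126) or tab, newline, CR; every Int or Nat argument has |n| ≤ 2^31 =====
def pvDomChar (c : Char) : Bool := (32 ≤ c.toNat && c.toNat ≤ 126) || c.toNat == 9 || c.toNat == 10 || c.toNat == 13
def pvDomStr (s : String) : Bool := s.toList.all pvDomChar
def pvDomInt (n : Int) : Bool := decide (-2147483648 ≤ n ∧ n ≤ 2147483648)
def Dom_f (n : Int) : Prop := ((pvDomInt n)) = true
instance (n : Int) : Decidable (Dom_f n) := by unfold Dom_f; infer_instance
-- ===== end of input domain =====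

-- B changes A's LSB-first %/​// digit loop with a power accumulator into Horner's method over str(n)
-- MSB-first (simpler: one running accumulator). Equivalence is claimed for 0 ≤ n (see Pre_f).

-- ===== PORT A =====
-- A's while-loop. Python's 'while tmp' never terminates for negative tmp (tmp //= 10 stalls at minus one);
-- those inputs are outside Pre_f, so the guard is written '0 < tmp' to make the port total.
def fLoop (n tmp ans base : Int) : Int :=
  if _h : 0 < tmp then
    fLoop n (PySem.Int.floordiv tmp 10) (ans + PySem.Int.mod tmp 10 * base) (base * n)
  else ans
termination_by tmp.toNat
decreasing_by
  simp only [PySem.Int.floordiv]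
  have h2 : tmp.fdiv 10 = tmp / 10 := Int.fdiv_eq_ediv_of_nonneg tmp (by norm_num)
  rw [h2]
  omega

def f (n : Int) : Int := fLoop n n 0 1

-- ===== PORT B =====
-- int(ch) for a single decimal digit character is ported as ch.toNat - 48, exact on '0'–'9';
-- under Pre_f every character of str(n) is such a digit.
def f_alt (n : Int) : Int :=
  (PySem.Int.toChars n).foldl (fun ans ch => ans * n + ((ch.toNat : Int) - 48)) 0

-- ===== PRECONDITION & SPEC =====
-- Pre_f excludes negative n: there A's 'while tmp' loop never terminates (tmp //= 10 stalls at minus one),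
-- and B raises ValueError on the sign character; A returns on exactly the nonnegative integers.
def Pre_f (n : Int) : Prop := 0 ≤ n
instance (n : Int) : Decidable (Pre_f n) := by unfold Pre_f; infer_instance
def pvWitness_f : Int := (907)

def Spec_f (n : Int) (out : Int) : Prop := out = f_alt n
instance (n : Int) (out : Int) : Decidable (Spec_f n out) := by unfold Spec_f; infer_instance

-- ===== CLAIM (what is proved, stated in full; the proofs are below) =====
def Claim_equal_f : Prop := ∀ (n : Int), Dom_f n → Pre_f n → Spec_f n (f n)

-- ===== LEMMAS AND PROOFS =====

-- Horner value of a LSB-first digit list, the common reference of both ports.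
def hornerLSB (n : Int) : List Nat → Int
  | [] => 0
  | d :: ds => (d : Int) + hornerLSB n ds * n

theorem fLoop_eq (n tmp ans base : Int) (ht : 0 ≤ tmp) :
    fLoop n tmp ans base = ans + base * hornerLSB n (Nat.digits 10 tmp.toNat) := by
  induction tmp, ans, base using fLoop.induct (n := n) with
  | case1 tmp ans base h ih =>
    rw [fLoop, dif_pos h]
    have hfd : PySem.Int.floordiv tmp 10 = tmp / 10 := by
      simp only [PySem.Int.floordiv]; exact Int.fdiv_eq_ediv_of_nonneg tmp (by norm_num)
    rw [ih (by rw [hfd]; positivity)]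
    have hmd : PySem.Int.mod tmp 10 = tmp % 10 := by
      simp only [PySem.Int.mod]; rw [Int.fmod_eq_emod]; norm_num
    have hdig : Nat.digits 10 tmp.toNat = tmp.toNat % 10 :: Nat.digits 10 (tmp.toNat / 10) := by
      exact Nat.digits_def' (by norm_num) (by omega)
    have h1 : (PySem.Int.floordiv tmp 10).toNat = tmp.toNat / 10 := by
      rw [hfd]; omega
    have h2 : PySem.Int.mod tmp 10 = ((tmp.toNat % 10 : Nat) : Int) := by
      rw [hmd]; omega
    rw [h1, hdig, h2]
    simp only [hornerLSB]
    ring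
  | case2 tmp ans base h =>
    rw [fLoop, dif_neg h]
    have h0 : tmp = 0 := by omega
    simp [h0, hornerLSB]

theorem digitChar_toNat (d : Nat) (h : d < 10) : (Nat.digitChar d).toNat = 48 + d := by
  interval_cases d <;> rfl

theorem toDigitsCore_eq (f : Nat) : ∀ (n : Nat) (acc : List Char), 0 < n → n < f →
    Nat.toDigitsCore 10 f n acc = ((Nat.digits 10 n).map Nat.digitChar).reverse ++ acc := by
  induction f with
  | zero => intro n acc _ hf; omega
  | succ f ih =>
    intro n acc hn hf
    rw [show Nat.toDigitsCore 10 (f+1) n acc =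
        (if n / 10 = 0 then Nat.digitChar (n % 10) :: acc
         else Nat.toDigitsCore 10 f (n / 10) (Nat.digitChar (n % 10) :: acc)) by
      simp [Nat.toDigitsCore]]
    rw [Nat.digits_def' (by norm_num : 1 < 10) hn]
    by_cases h0 : n / 10 = 0
    · simp [h0]
    · rw [if_neg h0, ih (n / 10) _ (by omega) (by omega)]
      simp

theorem foldr_digits (n : Int) : ∀ (ds : List Nat), (∀ d ∈ ds, d < 10) →
    (ds.map Nat.digitChar).foldr (fun ch acc => acc * n + ((ch.toNat : Int) - 48)) 0
      = hornerLSB n ds := by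
  intro ds
  induction ds with
  | nil => intro _; rfl
  | cons d ds ih =>
    intro h
    simp only [List.map_cons, List.foldr_cons, hornerLSB,
      ih (fun x hx => h x (List.mem_cons_of_mem _ hx)),
      digitChar_toNat d (h d (List.mem_cons_self))]
    push_cast
    ring

theorem f_spec : Claim_equal_f := by
  intro n _ hpre
  unfold Spec_f f f_alt
  by_cases h0 : n = 0
  · subst h0
    rw [fLoop, dif_neg (by norm_num)]
    simp [PySem.Int.toChars, Nat.toDigits, Nat.toDigitsCore]
    decide
  · have hn : 0 < n := lt_of_le_of_ne hpre (Ne.symm h0)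
    rw [fLoop_eq n n 0 1 hpre]
    have htc : PySem.Int.toChars n = Nat.toDigits 10 n.toNat := by
      simp [PySem.Int.toChars, not_lt.mpr hpre]
    rw [htc, show Nat.toDigits 10 n.toNat = Nat.toDigitsCore 10 (n.toNat + 1) n.toNat [] from rfl,
      toDigitsCore_eq (n.toNat + 1) n.toNat [] (by omega) (by omega),
      List.append_nil, List.foldl_reverse,
      foldr_digits n _ (fun d hd => Nat.digits_lt_base (by norm_num) hd)]
    ring
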